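-- pv_equiv track=rewrite | github.com/fredericVaquer/generative_audio_final_project | src/trim_dataset.py | find_trim_end
-- ===== SOURCE A (Python) =====
-- SILENCE_RUN        = 50    # consecutive zero samples required to declare silence
--
-- def find_trim_end(audio, silence_run=SILENCE_RUN):
--     """
--     Find the last sample index before a run of >= silence_run consecutive zeros.
--     Scans backwards looking for the first run of that length.
--     Returns the index just after the last non-silent sample.
--     """
--     n = len(audio)
--     run = 0
--     for i in range(n - 1, -1, -1):
--         if audio[i] == 0:
--             run += 1
--         else:
--             # Found a non-zero sample — check if the run behind us was long enough
--             if run >= silence_run: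
--                 # The silence started at i+1, sound ends at i+1
--                 return i + 1
--             else:
--                 # Short zero run inside real audio — reset
--                 run = 0
--     # No long silence run found — entire file is real audio, do not trim
--     return n
-- ===== SOURCE B (Python) =====
-- SILENCE_RUN = 50
--
--
-- def find_trim_end(audio, silence_run=SILENCE_RUN):
--     """Forward pass: collect indices of non-zero samples, then pick the last
--     non-zero index whose gap to the next non-zero (or the end) is >= silence_run."""
--     n = len(audio)
--     nz = [i for i, x in enumerate(audio) if x != 0]
--     ans = n
--     for j, k in zip(nz, nz[1:] + [n]):
--         if k - j - 1 >= silence_run: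
--             ans = j + 1
--     return ans
-- ===== Notes on version B (the rewrite author's own statement) =====
-- stated objective: alternative
-- what changed: A's backward scan with a run counter and early return is replaced by a forward pass that collects the non-zero indices and then selects the last non-zero index whose gap to the next non-zero (or to the end) is at least silence_run.
import Mathlib
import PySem

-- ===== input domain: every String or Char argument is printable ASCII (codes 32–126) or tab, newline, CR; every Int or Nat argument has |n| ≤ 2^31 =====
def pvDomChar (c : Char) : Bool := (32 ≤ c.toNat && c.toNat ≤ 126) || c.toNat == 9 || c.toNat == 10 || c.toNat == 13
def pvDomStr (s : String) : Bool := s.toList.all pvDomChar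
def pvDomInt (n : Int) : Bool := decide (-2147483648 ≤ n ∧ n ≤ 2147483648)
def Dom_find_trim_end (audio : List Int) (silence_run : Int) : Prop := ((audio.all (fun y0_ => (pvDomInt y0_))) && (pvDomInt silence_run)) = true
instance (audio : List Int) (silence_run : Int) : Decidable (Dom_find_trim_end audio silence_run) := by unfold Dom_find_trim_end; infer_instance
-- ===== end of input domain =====

-- B replaces A's backward early-return scan by a forward pass that collects the
-- non-zero indices and selects the last one whose gap to the next non-zero (or the
-- end) is ≥ silence_run; same O(n) cost, different decomposition (objective: alternative).

-- ===== PORT A =====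
-- backward loop over range(n-1, -1, -1); `some` = the early `return i + 1`.
-- every i drawn from the range is in bounds, so pyGetD is exact for audio[i].
def findA_go (audio : List Int) (silence_run : Int) : List Int → Int → Option Int
  | [], _run => none
  | i :: rest, run =>
      if PySem.List.pyGetD audio i 0 = 0 then
        findA_go audio silence_run rest (run + 1)
      else if silence_run ≤ run then some (i + 1)
      else findA_go audio silence_run rest 0

def find_trim_end (audio : List Int) (silence_run : Int) : Int :=
  (findA_go audio silence_run (PySem.List.pyRange ((audio.length : Int) - 1) (-1) (-1)) 0).getD
    (audio.length : Int)

-- ===== PORT B =====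
-- nz = [i for i, x in enumerate(audio) if x != 0]; fold over zip(nz, nz[1:] + [n])
def find_trim_end_alt (audio : List Int) (silence_run : Int) : Int :=
  let n : Int := (audio.length : Int)
  let nz : List Int := ((PySem.List.enumerate audio 0).filter (fun p => decide (p.2 ≠ 0))).map (fun p => p.1)
  let pairs : List (Int × Int) := nz.zip (nz.drop 1 ++ [n])
  pairs.foldl (fun ans jk => if silence_run ≤ jk.2 - jk.1 - 1 then jk.1 + 1 else ans) n

-- ===== PRECONDITION & SPEC =====
def Spec_find_trim_end (audio : List Int) (silence_run : Int) (out : Int) : Prop := out = find_trim_end_alt audio silence_run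
instance (audio : List Int) (silence_run : Int) (out : Int) : Decidable (Spec_find_trim_end audio silence_run out) := by unfold Spec_find_trim_end; infer_instance

-- ===== CLAIM (what is proved, stated in full; the proofs are below) =====
def Claim_equal_find_trim_end : Prop := ∀ (audio : List Int) (silence_run : Int), Dom_find_trim_end audio silence_run → Spec_find_trim_end audio silence_run (find_trim_end audio silence_run)

-- ===== LEMMAS AND PROOFS =====

-- reference right-to-left scan over the reversed list (common form of both ports)
def goR (s : Int) : List Int → Int → Option Int
  | [], _run => none
  | x :: t, run =>
      if x = 0 then goR s t (run + 1)
      else if s ≤ run then some ((t.length : Int) + 1)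
      else goR s t 0

-- the non-zero index list of B
def nzOf (audio : List Int) : List Int :=
  ((PySem.List.enumerate audio 0).filter (fun p => decide (p.2 ≠ 0))).map (fun p => p.1)

-- B's fold with an Option accumulator (none = "no qualifying pair yet")
def qfold (s : Int) (ps : List (Int × Int)) : Option Int :=
  ps.foldl (fun acc jk => if s ≤ jk.2 - jk.1 - 1 then some (jk.1 + 1) else acc) none

lemma lemA (audio : List Int) (s : Int) :
    ∀ (k : Nat), k ≤ audio.length → ∀ (run : Int),
      findA_go audio s (PySem.List.pyRange ((k : Int) - 1) (-1) (-1)) run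
        = goR s ((audio.take k).reverse) run := by
  intro k
  induction k with
  | zero =>
      intro _ run
      rw [PySem.List.pyRange_neg_one_eq_nil (by norm_num)]
      simp [findA_go, goR]
  | succ k ih =>
      intro hk run
      have hk' : k < audio.length := by omega
      have hrange : PySem.List.pyRange (((k : Nat) + 1 : Int) - 1) (-1) (-1)
          = ((k : Nat) : Int) :: PySem.List.pyRange (((k : Nat) : Int) - 1) (-1) (-1) := by
        have : (((k : Nat) + 1 : Int) - 1) = ((k : Nat) : Int) := by ring
        rw [this, PySem.List.pyRange_neg_one_cons (by omega)]
      have htake : (audio.take (k + 1)).reverse = audio[k] :: (audio.take k).reverse := by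
        rw [List.take_add_one]
        simp [List.getElem?_eq_getElem hk']
      have hget : PySem.List.pyGetD audio ((k : Nat) : Int) 0 = audio[k] := by
        rw [PySem.List.pyGetD_natCast, List.getD_eq_getElem _ _ hk']
      have hlen : ((audio.take k).reverse.length : Int) = (k : Int) := by
        simp [Nat.min_eq_left (le_of_lt hk')]
      push_cast
      rw [hrange, htake]
      simp only [findA_go, goR, hget, hlen]
      by_cases h0 : audio[k] = 0
      · simp only [h0, ite_true]
        exact ih (by omega) (run + 1)
      · simp only [if_neg h0]
        by_cases hs : s ≤ run
        · simp [hs]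
        · simp only [if_neg hs]
          exact ih (by omega) 0

lemma find_trim_end_eq_goR (audio : List Int) (s : Int) :
    find_trim_end audio s = (goR s audio.reverse 0).getD (audio.length : Int) := by
  unfold find_trim_end
  rw [lemA audio s audio.length le_rfl 0, List.take_length]

lemma foldl_opt (s : Int) (ps : List (Int × Int)) :
    ∀ (o : Option Int) (init : Int),
      ps.foldl (fun ans jk => if s ≤ jk.2 - jk.1 - 1 then jk.1 + 1 else ans) (o.getD init)
        = (ps.foldl (fun acc jk => if s ≤ jk.2 - jk.1 - 1 then some (jk.1 + 1) else acc) o).getD init := by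
  induction ps with
  | nil => intro o init; rfl
  | cons jk rest ih =>
      intro o init
      simp only [List.foldl_cons]
      by_cases h : s ≤ jk.2 - jk.1 - 1
      · simp only [if_pos h]
        exact ih (some (jk.1 + 1)) init
      · simp only [if_neg h]
        exact ih o init

lemma nzOf_append_singleton (ws : List Int) (x : Int) :
    nzOf (ws ++ [x]) = nzOf ws ++ (if x = 0 then [] else [(ws.length : Int)]) := by
  unfold nzOf
  rw [PySem.List.enumerate_append]
  by_cases h : x = 0 <;>
    simp [PySem.List.enumerate_cons, PySem.List.enumerate_nil, h]

lemma zip_snoc (a : List Int) (m t : Int) :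
    (a ++ [m]).zip ((a ++ [m]).drop 1 ++ [t]) = a.zip (a.drop 1 ++ [m]) ++ [(m, t)] := by
  cases a with
  | nil => simp
  | cons y a' =>
      have h1 : (y :: a').length = (a' ++ [m]).length := by simp
      calc ((y :: a') ++ [m]).zip (((y :: a' ++ [m]).drop 1) ++ [t])
          = ((y :: a') ++ [m]).zip ((a' ++ [m]) ++ [t]) := by simp
        _ = (y :: a').zip (a' ++ [m]) ++ [m].zip [t] := List.zip_append h1
        _ = (y :: a').zip ((y :: a').drop 1 ++ [m]) ++ [(m, t)] := by simp

lemma qfold_append_singleton (s : Int) (ps : List (Int × Int)) (jk : Int × Int) :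
    qfold s (ps ++ [jk]) = if s ≤ jk.2 - jk.1 - 1 then some (jk.1 + 1) else qfold s ps := by
  unfold qfold
  rw [List.foldl_append]
  simp only [List.foldl_cons, List.foldl_nil]

lemma goR_cons (s x : Int) (t : List Int) (run : Int) :
    goR s (x :: t) run
      = if x = 0 then goR s t (run + 1)
        else if s ≤ run then some ((t.length : Int) + 1) else goR s t 0 := rfl

lemma lemB (s : Int) (ws : List Int) :
    ∀ (r : Nat),
      qfold s ((nzOf ws).zip ((nzOf ws).drop 1 ++ [(ws.length : Int) + (r : Int)]))
        = goR s ws.reverse (r : Int) := by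
  induction ws using List.reverseRecOn with
  | nil => intro r; simp [nzOf, PySem.List.enumerate_nil, qfold, goR]
  | append_singleton ws x ih =>
      intro r
      rw [nzOf_append_singleton]
      by_cases h0 : x = 0
      · rw [if_pos h0, List.append_nil]
        have harg : ((ws ++ [x]).length : Int) + (r : Int)
            = (ws.length : Int) + ((r + 1 : Nat) : Int) := by
          simp only [List.length_append, List.length_cons, List.length_nil]; push_cast; ring
        rw [harg, ih (r + 1)]
        have hc : ((r : Nat) : Int) + 1 = ((r + 1 : Nat) : Int) := by push_cast; ring
        rw [List.reverse_append, List.reverse_singleton, List.singleton_append, goR_cons,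
          if_pos h0, hc]
      · simp only [if_neg h0]
        rw [zip_snoc, qfold_append_singleton]
        have hgap : ((ws ++ [x]).length : Int) + (r : Int) - (ws.length : Int) - 1 = (r : Int) := by
          simp; omega
        rw [hgap, List.reverse_append, List.reverse_singleton, List.singleton_append, goR_cons,
          if_neg h0, List.length_reverse]
        by_cases hs : s ≤ (r : Int)
        · rw [if_pos hs, if_pos hs]
        · rw [if_neg hs, if_neg hs]
          have h := ih 0
          rw [show ((ws.length : Int) + ((0 : Nat) : Int)) = (ws.length : Int) from by simp] at h
          exact h

lemma find_trim_end_alt_eq_goR (audio : List Int) (s : Int) :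
    find_trim_end_alt audio s = (goR s audio.reverse 0).getD (audio.length : Int) := by
  have h2 : qfold s ((nzOf audio).zip ((nzOf audio).drop 1 ++ [(audio.length : Int)]))
      = goR s audio.reverse 0 := by
    have h := lemB s audio 0
    rw [show ((audio.length : Int) + ((0 : Nat) : Int)) = (audio.length : Int) from by simp] at h
    exact h
  unfold find_trim_end_alt
  exact (foldl_opt s ((nzOf audio).zip ((nzOf audio).drop 1 ++ [(audio.length : Int)]))
    none (audio.length : Int)).trans (congrArg (fun o => o.getD ((audio.length : Int))) h2)

-- ===== VERDICT (by name: the statement is the Claim_ definition above) =====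
theorem find_trim_end_spec : Claim_equal_find_trim_end := by
  intro audio silence_run _
  unfold Spec_find_trim_end
  rw [find_trim_end_eq_goR, find_trim_end_alt_eq_goR]
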